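-- pv_equiv track=rewrite | github.com/Smurphicus/sandwich-simulator | src/scraper/formatter.py | probablyRealWord
-- ===== SOURCE A (Python) =====
-- def probablyRealWord(word):
-- 	ptr = 0
-- 	count = 1
-- 	if len(word) == 1 and word not in ['i','a']:
-- 		return False
-- 	while ptr < len(word)-1:
-- 		if word[ptr] == word[ptr+1]:
-- 			count += 1
-- 		else:
-- 			count = 1
-- 		if count >= 3:
-- 			return False
-- 		ptr += 1
-- 	return True
-- ===== SOURCE B (Python) =====
-- def probablyRealWord(word):
-- 	if len(word) == 1 and word not in ['i','a']:
-- 		return False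
-- 	return all(c*3 not in word for c in set(word))
-- ===== Notes on version B (the rewrite author's own statement) =====
-- stated objective: simpler
-- what changed: Replaces the pointer/run-counter state machine with a per-distinct-letter substring test: the word is valid iff for no letter c of its character set the string c*3 occurs as a substring.
import Mathlib
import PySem

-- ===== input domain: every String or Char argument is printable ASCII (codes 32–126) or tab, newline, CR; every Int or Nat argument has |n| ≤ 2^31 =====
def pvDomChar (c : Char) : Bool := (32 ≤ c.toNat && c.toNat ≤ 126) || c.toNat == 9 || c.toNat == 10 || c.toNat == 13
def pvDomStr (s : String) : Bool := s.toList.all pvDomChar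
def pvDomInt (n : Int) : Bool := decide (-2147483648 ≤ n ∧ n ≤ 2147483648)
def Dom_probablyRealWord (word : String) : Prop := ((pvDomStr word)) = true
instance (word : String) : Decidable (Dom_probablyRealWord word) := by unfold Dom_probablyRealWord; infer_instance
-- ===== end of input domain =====

-- B replaces A's pointer/run-counter state machine with a per-distinct-letter substring test:
-- the word is valid iff no letter c of its character set has c*3 occurring as a substring. Simpler; same behaviour.

-- ===== PORT A =====
-- the while loop: compares word[ptr] with word[ptr+1], carrying the run counter `count`
def probablyRealWordLoop : List Char → Nat → Bool
  | c1 :: c2 :: rest, count =>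
      let count' := if c1 = c2 then count + 1 else 1
      if count' ≥ 3 then false else probablyRealWordLoop (c2 :: rest) count'
  | _, _ => true

def probablyRealWord (word : String) : Bool :=
  let l := word.toList
  if l.length = 1 ∧ ¬ (l = ['i'] ∨ l = ['a']) then false
  else probablyRealWordLoop l 1

-- ===== PORT B =====
-- all(c*3 not in word for c in set(word))
def probablyRealWord_alt (word : String) : Bool :=
  let l := word.toList
  if l.length = 1 ∧ ¬ (l = ['i'] ∨ l = ['a']) then false
  else (PySem.Set.ofList l).all (fun c => !(PySem.Chars.isIn [c, c, c] l))

-- ===== PRECONDITION & SPEC =====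
def Spec_probablyRealWord (word : String) (out : Bool) : Prop := out = probablyRealWord_alt word
instance (word : String) (out : Bool) : Decidable (Spec_probablyRealWord word out) := by unfold Spec_probablyRealWord; infer_instance

-- ===== CLAIM (what is proved, stated in full; the proofs are below) =====
def Claim_equal_probablyRealWord : Prop := ∀ (word : String), Dom_probablyRealWord word → Spec_probablyRealWord word (probablyRealWord word)

-- ===== LEMMAS AND PROOFS =====

theorem loop_step1 (a b : Char) (r : List Char) :
    probablyRealWordLoop (a :: b :: r) 1
      = if a = b then probablyRealWordLoop (b :: r) 2 else probablyRealWordLoop (b :: r) 1 := by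
  by_cases h : a = b <;> simp [probablyRealWordLoop, h]

theorem loop_step2 (a b : Char) (r : List Char) :
    probablyRealWordLoop (a :: b :: r) 2
      = if a = b then false else probablyRealWordLoop (b :: r) 1 := by
  by_cases h : a = b <;> simp [probablyRealWordLoop, h]

theorem loop_cons3 (a b c : Char) (r : List Char) :
    probablyRealWordLoop (a :: b :: c :: r) 1
      = ((!(a = b ∧ b = c)) && probablyRealWordLoop (b :: c :: r) 1) := by
  rw [loop_step1]
  by_cases hab : a = b
  · rw [if_pos hab, loop_step2]
    by_cases hbc : b = c
    · simp [hab, hbc, probablyRealWordLoop]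
    · simp [hab, hbc, loop_step1]
  · simp [hab]

theorem triple_prefix_iff (x a b c : Char) (r : List Char) :
    [x, x, x] <+: a :: b :: c :: r ↔ x = a ∧ a = b ∧ b = c := by
  constructor
  · rintro ⟨t, ht⟩
    simp only [List.cons_append, List.nil_append, List.cons.injEq] at ht
    obtain ⟨h1, h2, h3, -⟩ := ht
    exact ⟨h1, h1.symm.trans h2, h2.symm.trans h3⟩
  · rintro ⟨h1, h2, h3⟩
    subst h1; subst h2; subst h3
    exact ⟨r, rfl⟩

theorem loop_true_iff : ∀ l : List Char,
    probablyRealWordLoop l 1 = true ↔ ∀ x : Char, ¬ [x, x, x] <:+: l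
  | [] => by
      simp only [probablyRealWordLoop, true_iff]
      intro x h
      have := h.length_le; simp at this
  | [a] => by
      simp only [probablyRealWordLoop, true_iff]
      intro x h
      have := h.length_le; simp at this
  | [a, b] => by
      constructor
      · intro _ x h
        have := h.length_le; simp at this
      · intro _
        by_cases h : a = b <;> simp [probablyRealWordLoop, h]
  | a :: b :: c :: r => by
      rw [loop_cons3, Bool.and_eq_true, loop_true_iff (b :: c :: r)]
      constructor
      · rintro ⟨h1, h2⟩ x hx
        rcases List.infix_cons_iff.mp hx with hpre | htail
        · rcases (triple_prefix_iff x a b c r).mp hpre with ⟨_, hab, hbc⟩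
          simp [hab, hbc] at h1
        · exact h2 x htail
      · intro h
        refine ⟨?_, fun x hx => h x (List.infix_cons_iff.mpr (Or.inr hx))⟩
        by_cases hab : a = b
        · by_cases hbc : b = c
          · exact absurd (List.infix_cons_iff.mpr
              (Or.inl ((triple_prefix_iff a a b c r).mpr ⟨rfl, hab, hbc⟩))) (h a)
          · simp [hab, hbc]
        · simp [hab]

theorem alt_check_iff (l : List Char) :
    ((PySem.Set.ofList l).all (fun c => !(PySem.Chars.isIn [c, c, c] l))) = true
      ↔ ∀ x : Char, ¬ [x, x, x] <:+: l := by
  rw [List.all_eq_true]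
  constructor
  · intro h x hx
    have hmem : x ∈ l := hx.subset (by simp)
    have := h x (by rw [PySem.Set.mem_ofList]; exact hmem)
    rw [Bool.not_eq_eq_eq_not, Bool.not_true, PySem.Chars.isIn_eq_false_iff] at this
    exact this hx
  · intro h c _
    rw [Bool.not_eq_eq_eq_not, Bool.not_true, PySem.Chars.isIn_eq_false_iff]
    exact h c

-- ===== VERDICT (by name: the statement is the Claim_ definition above) =====
theorem probablyRealWord_spec : Claim_equal_probablyRealWord := by
  intro word _
  unfold Spec_probablyRealWord probablyRealWord probablyRealWord_alt
  simp only []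
  by_cases hg : word.toList.length = 1 ∧ ¬ (word.toList = ['i'] ∨ word.toList = ['a'])
  · rw [if_pos hg, if_pos hg]
  · rw [if_neg hg, if_neg hg]
    rw [Bool.eq_iff_iff, loop_true_iff, alt_check_iff]
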